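-- pv_equiv track=rewrite | github.com/SonByeongJin/fear_greed | api/fgi_cnn.py | deduplicate_by_date
-- ===== SOURCE A (Python) =====
-- def deduplicate_by_date(data):
--     seen = set()
--     result = []
--     for item in data:
--         if item["x"] not in seen:
--             seen.add(item["x"])
--             result.append(item)
--     return result
-- ===== SOURCE B (Python) =====
-- def deduplicate_by_date(data):
--     if not data:
--         return []
--     head = data[0]
--     return [head] + deduplicate_by_date(
--         [it for it in data[1:] if it["x"] != head["x"]])
-- ===== Notes on version B (the rewrite author's own statement) =====
-- stated objective: alternative
-- what changed: Replaced the single-pass seen-set loop by a recursive partition scheme: take the first item, filter every later item sharing its date key out of the tail, and recurse on the filtered tail; no membership set or accumulator list exists.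
import Mathlib
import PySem

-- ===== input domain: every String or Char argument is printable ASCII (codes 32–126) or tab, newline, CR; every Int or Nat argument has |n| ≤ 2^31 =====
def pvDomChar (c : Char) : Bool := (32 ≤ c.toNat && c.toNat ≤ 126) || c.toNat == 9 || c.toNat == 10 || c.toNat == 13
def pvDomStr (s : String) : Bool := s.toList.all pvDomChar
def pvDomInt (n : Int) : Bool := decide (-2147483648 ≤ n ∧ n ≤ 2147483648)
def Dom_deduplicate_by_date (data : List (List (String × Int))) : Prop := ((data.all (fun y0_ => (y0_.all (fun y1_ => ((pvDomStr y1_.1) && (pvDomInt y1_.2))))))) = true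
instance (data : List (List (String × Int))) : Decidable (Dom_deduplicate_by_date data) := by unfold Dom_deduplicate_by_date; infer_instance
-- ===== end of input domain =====

-- B replaces A's seen-set loop by a recursive partition: keep the head, filter its date key
-- out of the tail, recurse (alternative decomposition; O(n^2) vs A's O(n); return value only).

-- item["x"]: dict lookup; total form under Pre_ (KeyError excluded there)
def pvKeyX (item : List (String × Int)) : Int := (PySem.Dict.mk item).getD "x" 0

-- ===== PORT A =====
def deduplicate_by_date (data : List (List (String × Int))) : List (List (String × Int)) :=
  (data.foldl
    (fun (st : PySem.Set Int × List (List (String × Int))) item =>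
      if PySem.Set.contains st.1 (pvKeyX item) then st
      else (PySem.Set.add st.1 (pvKeyX item), st.2 ++ [item]))
    (PySem.Set.empty, [])).2

-- ===== PORT B =====
def deduplicate_by_date_alt : List (List (String × Int)) → List (List (String × Int))
  | [] => []
  | head :: rest =>
    head :: deduplicate_by_date_alt (rest.filter (fun it => pvKeyX it != pvKeyX head))
termination_by data => data.length
decreasing_by
  simpa using Nat.lt_succ_of_le (List.length_filter_le _ _)

-- ===== PRECONDITION & SPEC =====
-- Pre_ excludes exactly the inputs where some item has no key "x": there Python A raises KeyError.
def Pre_deduplicate_by_date (data : List (List (String × Int))) : Prop :=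
  ∀ item ∈ data, "x" ∈ item.map (·.1)
instance (data : List (List (String × Int))) : Decidable (Pre_deduplicate_by_date data) := by
  unfold Pre_deduplicate_by_date; infer_instance
def pvWitness_deduplicate_by_date : (List (List (String × Int))) :=
  [[("x", 1), ("v", 7)], [("x", 2)], [("x", 1), ("v", 9)]]
def Spec_deduplicate_by_date (data : List (List (String × Int))) (out : List (List (String × Int))) : Prop := out = deduplicate_by_date_alt data
instance (data : List (List (String × Int))) (out : List (List (String × Int))) : Decidable (Spec_deduplicate_by_date data out) := by unfold Spec_deduplicate_by_date; infer_instance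

-- ===== CLAIM (what is proved, stated in full; the proofs are below) =====
def Claim_equal_deduplicate_by_date : Prop := ∀ (data : List (List (String × Int))), Dom_deduplicate_by_date data → Pre_deduplicate_by_date data → Spec_deduplicate_by_date data (deduplicate_by_date data)

-- ===== LEMMAS AND PROOFS =====

-- A's loop body, as a recursion on the list with the seen-set as a parameter.
def pvGo (s : PySem.Set Int) : List (List (String × Int)) → List (List (String × Int))
  | [] => []
  | it :: rest =>
    if PySem.Set.contains s (pvKeyX it) then pvGo s rest
    else it :: pvGo (PySem.Set.add s (pvKeyX it)) rest

lemma pv_alt_nil : deduplicate_by_date_alt [] = [] := by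
  rw [deduplicate_by_date_alt]

lemma pv_alt_cons (head : List (String × Int)) (rest : List (List (String × Int))) :
    deduplicate_by_date_alt (head :: rest)
      = head :: deduplicate_by_date_alt (rest.filter (fun it => pvKeyX it != pvKeyX head)) := by
  rw [deduplicate_by_date_alt]

lemma pv_foldA (data : List (List (String × Int))) (s : PySem.Set Int)
    (res : List (List (String × Int))) :
    (data.foldl
      (fun (st : PySem.Set Int × List (List (String × Int))) item =>
        if PySem.Set.contains st.1 (pvKeyX item) then st
        else (PySem.Set.add st.1 (pvKeyX item), st.2 ++ [item]))
      (s, res)).2 = res ++ pvGo s data := by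
  induction data generalizing s res with
  | nil => simp [pvGo]
  | cons it rest ih =>
    simp only [List.foldl_cons, pvGo]
    by_cases h : PySem.Set.contains s (pvKeyX it) = true
    · rw [if_pos h, if_pos h, ih]
    · rw [if_neg h, if_neg h, ih]
      simp

-- A's recursion with seen-set s is B's recursion on the items whose key is not in s.
lemma pv_go_alt (data : List (List (String × Int))) (s : PySem.Set Int) :
    pvGo s data
      = deduplicate_by_date_alt
          (data.filter (fun it => !PySem.Set.contains s (pvKeyX it))) := by
  induction data generalizing s with
  | nil => simp [pvGo, pv_alt_nil]
  | cons it rest ih =>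
    simp only [pvGo]
    by_cases h : PySem.Set.contains s (pvKeyX it) = true
    · rw [if_pos h, List.filter_cons_of_neg (by simpa using h), ih]
    · have h' : PySem.Set.contains s (pvKeyX it) = false := by simpa using h
      rw [if_neg h, List.filter_cons_of_pos (by simpa using h'),
        pv_alt_cons, List.filter_filter, ih]
      congr 2
      apply List.filter_congr
      intro a _
      by_cases h2 : pvKeyX a = pvKeyX it
      · simp [h2]
      · simp [h2, Bool.and_comm]

-- ===== VERDICT (by name: the statement is the Claim_ definition above) =====
theorem deduplicate_by_date_spec : Claim_equal_deduplicate_by_date := by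
  intro data _ _
  unfold Spec_deduplicate_by_date deduplicate_by_date
  rw [pv_foldA, pv_go_alt]
  simp [PySem.Set.empty, PySem.Set.contains]
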